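-- pv_equiv track=rewrite | github.com/suryansh-sr-17/autodialer | number_handler.py | parse_text_input
-- ===== SOURCE A (Python) =====
-- from typing import List, Tuple, Dict, Set
--
-- def parse_text_input(text: str) -> List[str]:
--     """
--     Parse phone numbers from text input (copy-paste).
--     Supports multiple formats: comma-separated, line-separated, space-separated.
--     """
--     if not text or not isinstance(text, str):
--         return []
--
--     # Split by common delimiters
--     delimiters = ['\n', '\r\n', ',', ';', '\t']
--     numbers = [text]
--
--     for delimiter in delimiters:
--         temp_numbers = []
--         for num in numbers:
--             temp_numbers.extend(num.split(delimiter))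
--         numbers = temp_numbers
--
--     # Clean and filter empty strings
--     cleaned_numbers = []
--     for number in numbers:
--         cleaned = number.strip()
--         if cleaned:
--             cleaned_numbers.append(cleaned)
--
--     return cleaned_numbers
-- ===== SOURCE B (Python) =====
-- def parse_text_input(text):
--     """Parse phone numbers from text with a single character tokenizer pass
--     (A instead re-splits the whole piece list once per delimiter)."""
--     if not text or not isinstance(text, str):
--         return []
--     result = []
--     buf = []
--     for ch in text:
--         if ch == '\n' or ch == ',' or ch == ';' or ch == '\t':
--             token = ''.join(buf).strip()
--             if token:
--                 result.append(token)
--             buf = []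
--         else:
--             buf.append(ch)
--     token = ''.join(buf).strip()
--     if token:
--         result.append(token)
--     return result
-- ===== Notes on version B (the rewrite author's own statement) =====
-- stated objective: alternative
-- what changed: Replaces A's five successive whole-list split passes (one per delimiter, rebuilding the piece list each time) plus a final strip-and-filter pass by a single left-to-right character tokenizer that cuts, strips and collects tokens in one traversal of the text.
import Mathlib
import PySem

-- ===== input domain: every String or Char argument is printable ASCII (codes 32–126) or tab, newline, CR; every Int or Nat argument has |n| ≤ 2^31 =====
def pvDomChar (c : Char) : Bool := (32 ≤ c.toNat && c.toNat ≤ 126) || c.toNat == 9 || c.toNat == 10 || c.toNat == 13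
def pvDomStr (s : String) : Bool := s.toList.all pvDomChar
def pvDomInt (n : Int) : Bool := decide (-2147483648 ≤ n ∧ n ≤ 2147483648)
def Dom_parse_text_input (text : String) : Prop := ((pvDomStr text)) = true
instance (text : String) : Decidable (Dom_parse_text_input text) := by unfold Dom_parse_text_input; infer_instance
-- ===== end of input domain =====

-- B replaces A's five whole-list split passes by a single left-to-right character
-- tokenizer (alternative one-pass decomposition, same tokens); proved equal on all inputs.

-- ===== PORT A =====
-- A, literally: numbers=[text]; for each delimiter, re-split every piece; then strip and drop empties.
def parse_text_input (text : String) : List String :=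
  if text = "" then []
  else
    let delimiters : List (List Char) := ["\n".toList, "\r\n".toList, ",".toList, ";".toList, "\t".toList]
    let numbers : List (List Char) :=
      delimiters.foldl
        (fun numbers d => numbers.foldl (fun temp num => temp ++ PySem.Chars.splitOn num d) [])
        [text.toList]
    numbers.foldl
      (fun acc number =>
        let cleaned := PySem.Chars.strip number
        if cleaned.isEmpty then acc else acc ++ [String.ofList cleaned]) []

-- ===== PORT B =====
def pvIsSep (c : Char) : Bool := c == '\n' || c == ',' || c == ';' || c == '\t'

-- finalise the buffer: strip it, append if non-empty
def pvFinal (res : List String) (buf : List Char) : List String :=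
  let token := PySem.Chars.strip buf
  if token.isEmpty then res else res ++ [String.ofList token]

def pvGo : List Char → List String → List Char → List String
  | [], res, buf => pvFinal res buf
  | c :: cs, res, buf =>
      if pvIsSep c then pvGo cs (pvFinal res buf) []
      else pvGo cs res (buf ++ [c])

def parse_text_input_alt (text : String) : List String :=
  if text = "" then [] else pvGo text.toList [] []

-- ===== PRECONDITION & SPEC =====
def Spec_parse_text_input (text : String) (out : List String) : Prop := out = parse_text_input_alt text
instance (text : String) (out : List String) : Decidable (Spec_parse_text_input text out) := by unfold Spec_parse_text_input; infer_instance

-- ===== CLAIM (what is proved, stated in full; the proofs are below) =====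
def Claim_equal_parse_text_input : Prop := ∀ (text : String), Dom_parse_text_input text → Spec_parse_text_input text (parse_text_input text)

-- ===== LEMMAS AND PROOFS =====

-- splitting a char list at every char satisfying p (empty pieces kept)
def mySplit (p : Char → Bool) : List Char → List (List Char)
  | [] => [[]]
  | c :: cs => if p c then [] :: mySplit p cs else (mySplit p cs).modifyHead (c :: ·)

-- strip every piece, drop the empties
def cleanL (ls : List (List Char)) : List String :=
  ls.filterMap (fun l =>
    let t := PySem.Chars.strip l
    if t.isEmpty then none else some (String.ofList t))

theorem mySplit_ne_nil (p : Char → Bool) (l : List Char) : mySplit p l ≠ [] := by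
  cases l with
  | nil => simp [mySplit]
  | cons c cs =>
    simp only [mySplit]
    split
    · simp
    · cases h : mySplit p cs with
      | nil => exact absurd h (mySplit_ne_nil p cs)
      | cons t ts => simp

theorem modifyHead_id' (l : List (List Char)) :
    List.modifyHead (fun x => x) l = l := by
  cases l <;> simp

theorem modifyHead_append_left {α : Type} (l r : List α) (f : α → α) (h : l ≠ []) :
    List.modifyHead f l ++ r = List.modifyHead f (l ++ r) := by
  cases l with
  | nil => exact absurd rfl h
  | cons a as => simp

theorem splitOn_go_single (c : Char) (fuel : Nat) :
    ∀ (l cur : List Char) (acc : List (List Char)), l.length ≤ fuel →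
    PySem.Chars.splitOn.go [c] fuel l cur acc
      = acc.reverse ++ (mySplit (· == c) l).modifyHead (cur.reverse ++ ·) := by
  induction fuel with
  | zero =>
    intro l cur acc hf
    have hl : l = [] := List.length_eq_zero_iff.mp (Nat.le_zero.mp hf)
    subst hl
    simp [PySem.Chars.splitOn.go, mySplit]
  | succ fuel ih =>
    intro l cur acc hf
    cases l with
    | nil => simp [PySem.Chars.splitOn.go, mySplit]
    | cons c' rest =>
      rw [PySem.Chars.splitOn.go.eq_def]
      simp only [List.isPrefixOf, Bool.and_true]
      simp only [List.length_cons] at hf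
      by_cases hc : c = c'
      · subst hc
        simp only [BEq.rfl, if_true]
        rw [List.length_singleton, List.drop_one, List.tail_cons,
          ih rest [] _ (by omega)]
        simp only [mySplit, BEq.rfl, if_true, List.reverse_cons, List.reverse_nil,
          List.nil_append, List.modifyHead, List.append_nil]
        cases mySplit (fun x => x == c) rest <;> simp
      · have hb : (c == c') = false := beq_eq_false_iff_ne.mpr hc
        have hb' : (c' == c) = false := beq_eq_false_iff_ne.mpr (Ne.symm hc)
        rw [if_neg (by simp [hb])]
        rw [ih rest (c' :: cur) acc (by omega)]
        simp only [mySplit, hb', Bool.false_eq_true, if_false]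
        rw [List.modifyHead_modifyHead]
        congr 1
        cases hms : mySplit (· == c) rest with
        | nil => exact absurd hms (mySplit_ne_nil _ rest)
        | cons t ts => simp [List.modifyHead, Function.comp]

theorem splitOn_single (c : Char) (l : List Char) :
    PySem.Chars.splitOn l [c] = mySplit (· == c) l := by
  unfold PySem.Chars.splitOn
  rw [splitOn_go_single c _ l [] [] (by omega)]
  simp [modifyHead_id']

theorem splitOn_go_rn (fuel : Nat) :
    ∀ (l cur : List Char) (acc : List (List Char)), '\n' ∉ l →
    PySem.Chars.splitOn.go ['\r', '\n'] fuel l cur acc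
      = ((cur.reverse ++ l) :: acc).reverse := by
  induction fuel with
  | zero => intro l cur acc _; rw [PySem.Chars.splitOn.go.eq_def]
  | succ fuel ih =>
    intro l cur acc h
    cases l with
    | nil => simp [PySem.Chars.splitOn.go]
    | cons c rest =>
      rw [PySem.Chars.splitOn.go.eq_def]
      have hpre : List.isPrefixOf ['\r', '\n'] (c :: rest) = false := by
        cases rest with
        | nil => simp [List.isPrefixOf]
        | cons c2 r2 =>
          simp only [List.isPrefixOf, Bool.and_true]
          have h2 : (c2 == '\n') = false := by
            refine beq_eq_false_iff_ne.mpr (fun hh => h ?_)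
            rw [hh]; exact List.mem_cons_of_mem _ List.mem_cons_self
          simp
          exact fun _ hn => (beq_eq_false_iff_ne.mp h2) hn.symm
      simp only [hpre, Bool.false_eq_true, if_false]
      rw [ih rest (c :: cur) acc (fun hm => h (List.mem_cons_of_mem _ hm))]
      simp

theorem splitOn_rn (l : List Char) (h : '\n' ∉ l) :
    PySem.Chars.splitOn l ['\r', '\n'] = [l] := by
  unfold PySem.Chars.splitOn
  rw [splitOn_go_rn _ l [] [] h]
  simp

theorem mem_mySplit_not_p (p : Char → Bool) (l : List Char) :
    ∀ t ∈ mySplit p l, ∀ c ∈ t, p c = false := by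
  induction l with
  | nil => intro t ht; simp [mySplit] at ht; subst ht; simp
  | cons c cs ih =>
    intro t ht
    simp only [mySplit] at ht
    by_cases hp : p c
    · rw [if_pos hp] at ht
      rcases List.mem_cons.mp ht with h | h
      · subst h; simp
      · exact ih t h
    · rw [if_neg hp] at ht
      cases hms : mySplit p cs with
      | nil => exact absurd hms (mySplit_ne_nil p cs)
      | cons t0 ts =>
        rw [hms, List.modifyHead] at ht
        rcases List.mem_cons.mp ht with h | h
        · subst h
          intro d hd
          rcases List.mem_cons.mp hd with h | h
          · subst h; exact Bool.eq_false_iff.mpr hp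
          · exact ih t0 (by rw [hms]; exact List.mem_cons_self) d h
        · exact ih t (by rw [hms]; exact List.mem_cons_of_mem _ h)

theorem flatMap_mySplit (p q : Char → Bool) (l : List Char) :
    (mySplit p l).flatMap (mySplit q) = mySplit (fun c => p c || q c) l := by
  induction l with
  | nil => simp [mySplit]
  | cons c cs ih =>
    simp only [mySplit]
    by_cases hp : p c
    · simp [hp, List.flatMap_cons, mySplit, ih]
    · simp only [hp, Bool.false_eq_true, if_false, Bool.false_or]
      cases hms : mySplit p cs with
      | nil => exact absurd hms (mySplit_ne_nil p cs)
      | cons t ts =>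
        rw [hms] at ih
        simp only [List.modifyHead, List.flatMap_cons]
        by_cases hq : q c
        · simp only [mySplit, hq, if_true]
          rw [List.cons_append, ← List.flatMap_cons, ih]
        · simp only [mySplit, hq, Bool.false_eq_true, if_false]
          rw [modifyHead_append_left _ _ _ (mySplit_ne_nil q t),
            ← List.flatMap_cons, ih]
          cases hms3 : mySplit (fun c => p c || q c) cs with
          | nil => exact absurd hms3 (mySplit_ne_nil _ cs)
          | cons v vs => simp [List.modifyHead]

theorem foldl_clean (ls : List (List Char)) (init : List String) :
    ls.foldl
      (fun acc number =>
        let cleaned := PySem.Chars.strip number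
        if cleaned.isEmpty then acc else acc ++ [String.ofList cleaned]) init
      = init ++ cleanL ls := by
  induction ls generalizing init with
  | nil => simp [cleanL]
  | cons t ts ih =>
    simp only [List.foldl_cons, cleanL, List.filterMap_cons]
    split
    · rw [ih]; simp_all [cleanL]
    · rw [ih]; simp_all [cleanL]

theorem pvFinal_eq (res : List String) (buf : List Char) :
    pvFinal res buf = res ++ cleanL [buf] := by
  simp only [pvFinal, cleanL, List.filterMap_cons, List.filterMap_nil]
  split <;> simp_all

theorem pvGo_eq (cs : List Char) :
    ∀ (res : List String) (buf : List Char),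
    pvGo cs res buf = res ++ cleanL ((mySplit pvIsSep cs).modifyHead (buf ++ ·)) := by
  induction cs with
  | nil =>
    intro res buf
    simp only [pvGo, mySplit, List.modifyHead, List.append_nil]
    exact pvFinal_eq res buf
  | cons c cs ih =>
    intro res buf
    simp only [pvGo, mySplit]
    by_cases hc : pvIsSep c
    · simp only [hc, if_true]
      rw [ih, pvFinal_eq]
      simp only [List.append_assoc]
      congr 1
      cases hms : mySplit pvIsSep cs with
      | nil => exact absurd hms (mySplit_ne_nil _ cs)
      | cons t ts =>
        simp only [List.modifyHead, cleanL, List.filterMap_cons, List.filterMap_nil,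
          List.nil_append, List.append_nil]
        split_ifs <;> simp
    · simp only [hc, Bool.false_eq_true, if_false]
      rw [ih, List.modifyHead_modifyHead]
      have : ((fun x => buf ++ x) ∘ (fun x => c :: x)) = (fun x => (buf ++ [c]) ++ x) := by
        funext x; simp
      rw [this]

-- ===== VERDICT (by name: the statement is the Claim_ definition above) =====
theorem parse_text_input_spec : Claim_equal_parse_text_input := by
  intro text _
  unfold Spec_parse_text_input parse_text_input parse_text_input_alt
  by_cases h : text = ""
  · simp [h]
  · simp only [h, if_false]
    set l := text.toList with hl
    simp only [List.foldl_cons, List.foldl_nil,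
      PySem.List.foldl_append_eq_flatMap, List.nil_append,
      show "\n".toList = ['\n'] from rfl, show "\r\n".toList = ['\r', '\n'] from rfl,
      show ",".toList = [','] from rfl, show ";".toList = [';'] from rfl,
      show "\t".toList = ['\t'] from rfl]
    -- step 1: split on '\n'
    rw [show ([l].flatMap (fun num => PySem.Chars.splitOn num ['\n']))
        = mySplit (· == '\n') l by simp [splitOn_single]]
    -- step 2: split on "\r\n" is the identity (no piece contains '\n')
    rw [show ((mySplit (· == '\n') l).flatMap (fun num => PySem.Chars.splitOn num ['\r', '\n']))
        = mySplit (· == '\n') l by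
      rw [List.flatMap_congr (g := fun t => [t]) ?_, List.flatMap_singleton']
      intro t ht
      refine splitOn_rn t (fun hc => ?_)
      have := mem_mySplit_not_p _ l t ht '\n' hc
      simp at this]
    -- steps 3-5: split on ',', ';', '\t'
    rw [List.flatMap_congr (g := mySplit (· == ',')) (fun t _ => splitOn_single ',' t),
      flatMap_mySplit]
    rw [List.flatMap_congr (g := mySplit (· == ';')) (fun t _ => splitOn_single ';' t),
      flatMap_mySplit]
    rw [List.flatMap_congr (g := mySplit (· == '\t')) (fun t _ => splitOn_single '\t' t),
      flatMap_mySplit]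
    rw [foldl_clean, List.nil_append, pvGo_eq]
    have hid : (fun x => ([] : List Char) ++ x) = (fun x : List Char => x) := by funext x; simp
    rw [hid, modifyHead_id', List.nil_append]
    rfl
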